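-- pv_equiv track=rewrite | github.com/BraCR10/TEC_Assigments-Intro-Taller-SI | Ejercicios con loops/02-sumaSinCeros.py | sumasinceros
-- ===== SOURCE A (Python) =====
-- def lenNum(num):#Funcion del largo
--     if isinstance(num,int):
--         if num==0:#Validacion
--             return 1
--         else:
--             num=abs(num)
--             cont=0
--             while num!=0:
--                 temp=num%10#Recolecta el ultimo numero
--                 num=num//10#Elimina el ultimo numero
--                 cont+=1#Contador
--             return cont
--     else:#Validacion
--         return 'Deben ser enteros'
--
-- def sumasinceros(num1,num2):
--     if type(num1)==int and isinstance(num2,int) and lenNum(num1)==lenNum(num2):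
--         num1=abs(num1)#Para siempre tener positivos
--         num2=abs(num2)#Para siempre tener positivos
--         expnum1=0
--         expnum2=0
--         numNuevo1=0
--         numNuevo2=0
--         while num1!=0:
--             if num1%10==0:#Ve el ultimo digito del numero, para brincarse los 0s
--                 num1//=10#Quita el ultimo digito
--             else:
--                 numNuevo1+=(num1%10)*(10**expnum1)#Concatena cada numero en el entero
--                 #Primero numNuevo1 = 3*1=3 Segundo numNuevo1 = 3*1=3 + 2*10=20 ........
--                 num1//=10#Quita el ultimo digito
--                 expnum1+=1
--         while num2!=0:
--             if num2%10==0:#Ve el ultimo digito del numero, para brincarse los 0s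
--                 num2//=10#Quita el ultimo digito
--             else:
--                 numNuevo2+=(num2%10)*(10**expnum2)
--                 num2//=10
--                 expnum2+=1
--         return numNuevo1+numNuevo2
--     else:
--         return 'Deben ser enteros'
-- ===== SOURCE B (Python) =====
-- # B: extract each number's decimal digit list once (LSB-first), reuse its length
-- # for the equal-digit-count guard, and fold v*10+d over the nonzero digits
-- # MSB-first -- no separate length pass, no 10**exp reconstruction.
--
-- def _digits(n):
--     # LSB-first decimal digits of n >= 0; [0] for 0
--     ds = []
--     while n:
--         ds.append(n % 10)
--         n //= 10
--     return ds or [0]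
--
-- def _value(ds):
--     # value of the digits with zeros removed (MSB-first fold)
--     v = 0
--     for d in reversed(ds):
--         if d:
--             v = v * 10 + d
--     return v
--
-- def sumasinceros(num1, num2):
--     if type(num1) == int and isinstance(num2, int):
--         d1 = _digits(abs(num1))
--         d2 = _digits(abs(num2))
--         if len(d1) == len(d2):
--             return _value(d1) + _value(d2)
--     return 'Deben ser enteros'
-- ===== Notes on version B (the rewrite author's own statement) =====
-- stated objective: alternative
-- what changed: B extracts each number's digit list once and reuses its length for the guard and a single MSB-first fold v*10+d for the zero-stripped value, instead of A's separate lenNum counting loop plus per-number loops that rebuild the value with 10**exp powers.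
-- outside the precondition, e.g. on sumasinceros(1, 10): A returns 'Deben ser enteros', B returns 'Deben ser enteros'
import Mathlib
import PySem

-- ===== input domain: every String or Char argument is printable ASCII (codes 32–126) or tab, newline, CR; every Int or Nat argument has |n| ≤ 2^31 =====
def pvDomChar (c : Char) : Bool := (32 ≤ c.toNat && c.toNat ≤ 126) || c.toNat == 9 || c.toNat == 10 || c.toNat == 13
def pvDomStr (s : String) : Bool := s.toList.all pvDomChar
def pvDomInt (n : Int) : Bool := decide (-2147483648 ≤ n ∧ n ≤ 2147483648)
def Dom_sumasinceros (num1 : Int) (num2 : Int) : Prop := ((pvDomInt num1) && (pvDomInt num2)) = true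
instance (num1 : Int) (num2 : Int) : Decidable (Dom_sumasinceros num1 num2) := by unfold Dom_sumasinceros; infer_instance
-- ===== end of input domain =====

-- B computes each number's digit list once and folds v*10+d over the nonzero digits,
-- instead of A's separate lenNum counting loop and per-number loops rebuilding the value
-- with 10**exp powers (alternative decomposition; equivalence on equal-digit-count inputs).

-- ===== PORT A =====
-- lenNum's counting loop: after abs the number is nonnegative, so Python's % and // are Nat's.
def pvLenLoop (n cont : Nat) : Nat :=
  if h : n = 0 then cont else pvLenLoop (n / 10) (cont + 1)
decreasing_by exact Nat.div_lt_self (Nat.pos_of_ne_zero h) (by omega)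

-- lenNum: the isinstance branch is always taken (the argument is an Int here)
def pvLenNum (num : Int) : Nat :=
  if num = 0 then 1 else pvLenLoop num.natAbs 0

-- the while-loop of sumasinceros on abs(num): state (num, expnum, numNuevo)
def pvStrip (n exp acc : Nat) : Nat :=
  if h : n = 0 then acc
  else if n % 10 = 0 then pvStrip (n / 10) exp acc
  else pvStrip (n / 10) (exp + 1) (acc + (n % 10) * 10 ^ exp)
decreasing_by all_goals exact Nat.div_lt_self (Nat.pos_of_ne_zero h) (by omega)

-- On the else-branch Python returns the string 'Deben ser enteros', which is not an Int;
-- those inputs are excluded by Pre_ and the port returns 0 there.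
def sumasinceros (num1 : Int) (num2 : Int) : Int :=
  if pvLenNum num1 = pvLenNum num2 then
    ((pvStrip num1.natAbs 0 0 + pvStrip num2.natAbs 0 0 : Nat) : Int)
  else 0

-- ===== PORT B =====
-- _digits: LSB-first decimal digits, appended as Python's list.append does; [0] for 0
def pvDigitsLoop (n : Nat) (acc : List Nat) : List Nat :=
  if h : n = 0 then acc else pvDigitsLoop (n / 10) (acc ++ [n % 10])
decreasing_by exact Nat.div_lt_self (Nat.pos_of_ne_zero h) (by omega)

def pvDigits (n : Nat) : List Nat :=
  let ds := pvDigitsLoop n []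
  if ds = [] then [0] else ds

-- _value: MSB-first fold over reversed(ds), skipping zero digits
def pvValue (ds : List Nat) : Nat :=
  ds.reverse.foldl (fun v d => if d ≠ 0 then v * 10 + d else v) 0

-- on the else-branch Python B returns the string (outside Pre_); the port returns 0 there
def sumasinceros_alt (num1 : Int) (num2 : Int) : Int :=
  let d1 := pvDigits num1.natAbs
  let d2 := pvDigits num2.natAbs
  if d1.length = d2.length then ((pvValue d1 + pvValue d2 : Nat) : Int) else 0

-- ===== PRECONDITION & SPEC =====
-- Pre_ excludes inputs whose decimal digit counts differ: there A returns the string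
-- 'Deben ser enteros', which is not a value of the declared Int result type.
def Pre_sumasinceros (num1 : Int) (num2 : Int) : Prop :=
  Nat.log 10 num1.natAbs = Nat.log 10 num2.natAbs
instance (num1 : Int) (num2 : Int) : Decidable (Pre_sumasinceros num1 num2) := by
  unfold Pre_sumasinceros; infer_instance

def pvWitness_sumasinceros : Int × Int := (102, -345)

def Spec_sumasinceros (num1 : Int) (num2 : Int) (out : Int) : Prop := out = sumasinceros_alt num1 num2
instance (num1 : Int) (num2 : Int) (out : Int) : Decidable (Spec_sumasinceros num1 num2 out) := by unfold Spec_sumasinceros; infer_instance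

-- ===== CLAIM (what is proved, stated in full; the proofs are below) =====
def Claim_equal_sumasinceros : Prop := ∀ (num1 : Int) (num2 : Int), Dom_sumasinceros num1 num2 → Pre_sumasinceros num1 num2 → Spec_sumasinceros num1 num2 (sumasinceros num1 num2)

-- ===== LEMMAS AND PROOFS =====

-- reference value: |n| with its zero digits removed
def pvV (n : Nat) : Nat :=
  if h : n = 0 then 0
  else if n % 10 = 0 then pvV (n / 10)
  else pvV (n / 10) * 10 + n % 10
decreasing_by all_goals exact Nat.div_lt_self (Nat.pos_of_ne_zero h) (by omega)

theorem pvLenLoop_eq (n : Nat) (hn : n ≠ 0) : ∀ c, pvLenLoop n c = c + Nat.log 10 n + 1 := by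
  induction n using Nat.strong_induction_on with
  | _ n ih =>
    intro c
    rw [pvLenLoop, dif_neg hn]
    by_cases h10 : n < 10
    · have hd : n / 10 = 0 := Nat.div_eq_of_lt h10
      rw [hd, pvLenLoop, dif_pos rfl, Nat.log_eq_zero_iff.mpr (Or.inl h10)]
    · have hd : n / 10 ≠ 0 := by
        intro h; have := Nat.lt_of_div_eq_zero (by omega) h; omega
      rw [ih (n / 10) (Nat.div_lt_self (Nat.pos_of_ne_zero hn) (by omega)) hd (c + 1)]
      have hlog : Nat.log 10 (n / 10) = Nat.log 10 n - 1 := Nat.log_div_base 10 n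
      have hpos : 1 ≤ Nat.log 10 n := by
        rw [Nat.one_le_iff_ne_zero, Ne, Nat.log_eq_zero_iff]; push Not; omega
      omega

theorem pvLenNum_eq (num : Int) : pvLenNum num = Nat.log 10 num.natAbs + 1 := by
  unfold pvLenNum
  by_cases h : num = 0
  · simp [h]
  · have hn : num.natAbs ≠ 0 := by simpa using h
    rw [if_neg h, pvLenLoop_eq num.natAbs hn 0]; omega

theorem pvStrip_eq (n : Nat) : ∀ exp acc, pvStrip n exp acc = acc + pvV n * 10 ^ exp := by
  induction n using Nat.strong_induction_on with
  | _ n ih =>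
    intro exp acc
    by_cases hn : n = 0
    · rw [hn, pvStrip, dif_pos rfl, pvV, dif_pos rfl]; omega
    · have hlt := Nat.div_lt_self (Nat.pos_of_ne_zero hn) (show 1 < 10 by omega)
      rw [pvStrip, dif_neg hn, pvV, dif_neg hn]
      by_cases hm : n % 10 = 0
      · rw [if_pos hm, if_pos hm, ih (n / 10) hlt]
      · rw [if_neg hm, if_neg hm, ih (n / 10) hlt]
        ring

theorem pvDigitsLoop_acc (n : Nat) : ∀ acc, pvDigitsLoop n acc = acc ++ pvDigitsLoop n [] := by
  induction n using Nat.strong_induction_on with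
  | _ n ih =>
    intro acc
    by_cases hn : n = 0
    · rw [hn]; rw [pvDigitsLoop, dif_pos rfl, pvDigitsLoop, dif_pos rfl]; simp
    · have hlt := Nat.div_lt_self (Nat.pos_of_ne_zero hn) (show 1 < 10 by omega)
      rw [pvDigitsLoop, dif_neg hn, ih (n / 10) hlt (acc ++ [n % 10])]
      conv_rhs => rw [pvDigitsLoop, dif_neg hn, ih (n / 10) hlt ([] ++ [n % 10])]
      simp

theorem pvDigitsLoop_len (n : Nat) (hn : n ≠ 0) :
    (pvDigitsLoop n []).length = Nat.log 10 n + 1 := by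
  induction n using Nat.strong_induction_on with
  | _ n ih =>
    rw [pvDigitsLoop, dif_neg hn, pvDigitsLoop_acc]
    by_cases h10 : n < 10
    · have hd : n / 10 = 0 := Nat.div_eq_of_lt h10
      rw [hd, Nat.log_eq_zero_iff.mpr (Or.inl h10)]
      rw [pvDigitsLoop, dif_pos rfl]; simp
    · have hd : n / 10 ≠ 0 := by
        intro h; have := Nat.lt_of_div_eq_zero (by omega) h; omega
      have ihlen := ih (n / 10) (Nat.div_lt_self (Nat.pos_of_ne_zero hn) (by omega)) hd
      have hlog : Nat.log 10 (n / 10) = Nat.log 10 n - 1 := Nat.log_div_base 10 n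
      have hpos : 1 ≤ Nat.log 10 n := by
        rw [Nat.one_le_iff_ne_zero, Ne, Nat.log_eq_zero_iff]; push Not; omega
      simp only [List.length_append, List.length_singleton, List.length_nil, ihlen]
      omega

theorem pvDigits_len (n : Nat) : (pvDigits n).length = Nat.log 10 n + 1 := by
  unfold pvDigits
  by_cases hn : n = 0
  · rw [hn]; rw [pvDigitsLoop, dif_pos rfl]; simp
  · have h := pvDigitsLoop_len n hn
    have hne : pvDigitsLoop n [] ≠ [] := by
      intro h0; rw [h0] at h; simp at h
    simp only [if_neg hne, h]

theorem pvValue_loop (n : Nat) :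
    ∀ v, (pvDigitsLoop n []).reverse.foldl (fun v d => if d ≠ 0 then v * 10 + d else v) v
      = if n = 0 then v else
          (if n % 10 ≠ 0 then
            ((pvDigitsLoop (n / 10) []).reverse.foldl (fun v d => if d ≠ 0 then v * 10 + d else v) v) * 10 + n % 10
          else
            (pvDigitsLoop (n / 10) []).reverse.foldl (fun v d => if d ≠ 0 then v * 10 + d else v) v) := by
  intro v
  by_cases hn : n = 0
  · rw [hn]; rw [pvDigitsLoop, dif_pos rfl]; simp
  · rw [if_neg hn]
    conv_lhs => rw [pvDigitsLoop, dif_neg hn, pvDigitsLoop_acc]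
    rw [List.reverse_append, List.foldl_append]
    simp only [List.nil_append, List.reverse_singleton, List.foldl_cons, List.foldl_nil]

theorem pvValue_digitsLoop (n : Nat) :
    (pvDigitsLoop n []).reverse.foldl (fun v d => if d ≠ 0 then v * 10 + d else v) 0 = pvV n := by
  induction n using Nat.strong_induction_on with
  | _ n ih =>
    by_cases hn : n = 0
    · rw [hn, pvValue_loop, if_pos rfl, pvV, dif_pos rfl]
    · have hlt := Nat.div_lt_self (Nat.pos_of_ne_zero hn) (show 1 < 10 by omega)
      rw [pvValue_loop, if_neg hn, pvV, dif_neg hn]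
      by_cases hm : n % 10 = 0
      · simp only [hm, ne_eq, not_true_eq_false, if_false, ih (n / 10) hlt]
        simp
      · rw [if_pos hm, if_neg hm, ih (n / 10) hlt]

theorem pvValue_pvDigits (n : Nat) : pvValue (pvDigits n) = pvV n := by
  unfold pvValue pvDigits
  by_cases hn : n = 0
  · rw [hn]; rw [pvDigitsLoop, dif_pos rfl, pvV, dif_pos rfl]; simp
  · have h := pvDigitsLoop_len n hn
    have hne : pvDigitsLoop n [] ≠ [] := by
      intro h0; rw [h0] at h; simp at h
    simp only [if_neg hne]
    exact pvValue_digitsLoop n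

-- ===== VERDICT (by name: the statement is the Claim_ definition above) =====
theorem sumasinceros_spec : Claim_equal_sumasinceros := by
  intro num1 num2 _ hpre
  unfold Spec_sumasinceros sumasinceros sumasinceros_alt
  have hA : pvLenNum num1 = pvLenNum num2 := by
    rw [pvLenNum_eq, pvLenNum_eq, hpre]
  have hB : (pvDigits num1.natAbs).length = (pvDigits num2.natAbs).length := by
    rw [pvDigits_len, pvDigits_len, hpre]
  simp only [hA, hB, if_true]
  rw [pvStrip_eq, pvStrip_eq, pvValue_pvDigits, pvValue_pvDigits]
  norm_num
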